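-- pv_equiv track=rewrite | github.com/Viknesh-Rajaramon/Leetcode-Problems | Algorithms/Medium/3612_Process_String_with_Special_Operations_I.py | processStr
-- ===== SOURCE A (Python) =====
-- def processStr(s: str) -> str:
--     result = ""
--     for c in s:
--         if c == "*":
--             if len(result) > 0:
--                 result = result[ : -1]
--         elif c == "#":
--             result = result + result
--         elif c == "%":
--             result = result[::-1]
--         else:
--             result = result + c
--
--     return result
-- ===== SOURCE B (Python) =====
-- def processStr(s: str) -> str:
--     # value = front[::-1] + back; '%' is O(1) (swap halves), append/pop amortised cheap
--     front, back = [], []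
--     for c in s:
--         if c == "*":
--             if back:
--                 back.pop()
--             elif front:
--                 del front[0]
--         elif c == "#":
--             back = back + front[::-1] + back
--         elif c == "%":
--             front, back = back, front
--         else:
--             back.append(c)
--     return "".join(reversed(front)) + "".join(back)
-- ===== Notes on version B (the rewrite author's own statement) =====
-- stated objective: alternative
-- what changed: B keeps the string as two halves (front reversed, back) so a reversal operation is an O(1) swap of the halves and appends/deletes touch one end, instead of A copying the whole current string on every delete, doubling and reversal.
import Mathlib
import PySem

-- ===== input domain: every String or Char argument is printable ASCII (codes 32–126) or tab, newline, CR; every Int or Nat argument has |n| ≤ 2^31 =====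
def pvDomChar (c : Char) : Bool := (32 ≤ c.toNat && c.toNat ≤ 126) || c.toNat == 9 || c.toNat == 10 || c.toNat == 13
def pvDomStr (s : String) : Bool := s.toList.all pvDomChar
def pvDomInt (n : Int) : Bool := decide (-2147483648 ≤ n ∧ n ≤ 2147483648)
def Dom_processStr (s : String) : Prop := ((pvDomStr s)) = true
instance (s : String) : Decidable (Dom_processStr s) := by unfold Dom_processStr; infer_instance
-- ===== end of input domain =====

-- B keeps the string as two halves (value = front.reverse ++ back) so a reversal op is a swap
-- of the halves instead of a copy; same return value as A on every input (alternative decomposition).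

-- ===== PORT A =====
-- one character of A's loop: result[:-1] / result+result / result[::-1] / result+c
def processStrA_step (r : List Char) (c : Char) : List Char :=
  if c = '*' then
    if r.length > 0 then PySem.List.slice r none (some (-1)) else r
  else if c = '#' then r ++ r
  else if c = '%' then (PySem.List.slice? r none none (-1)).getD []  -- r[::-1]; step -1 never raises
  else r ++ [c]

def processStr (s : String) : String :=
  String.ofList (s.toList.foldl processStrA_step [])

-- ===== PORT B =====
-- one character of B's loop on the state (front, back); value = front.reverse ++ back
def processStrB_step (st : List Char × List Char) (c : Char) : List Char × List Char :=
  if c = '*' then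
    if st.2 ≠ [] then (st.1, st.2.dropLast)
    else if st.1 ≠ [] then (st.1.drop 1, st.2)   -- del front[0]
    else st
  else if c = '#' then (st.1, st.2 ++ st.1.reverse ++ st.2)
  else if c = '%' then (st.2, st.1)
  else (st.1, st.2 ++ [c])

def processStr_alt (s : String) : String :=
  let st := s.toList.foldl processStrB_step ([], [])
  String.ofList (st.1.reverse ++ st.2)

-- ===== PRECONDITION & SPEC =====
def Spec_processStr (s : String) (out : String) : Prop := out = processStr_alt s
instance (s : String) (out : String) : Decidable (Spec_processStr s out) := by unfold Spec_processStr; infer_instance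

-- ===== CLAIM (what is proved, stated in full; the proofs are below) =====
def Claim_equal_processStr : Prop := ∀ (s : String), Dom_processStr s → Spec_processStr s (processStr s)

-- ===== LEMMAS AND PROOFS =====

-- one step preserves the representation invariant
theorem step_inv (f b : List Char) (c : Char) :
    processStrA_step (f.reverse ++ b) c
      = (processStrB_step (f, b) c).1.reverse ++ (processStrB_step (f, b) c).2 := by
  unfold processStrA_step processStrB_step
  by_cases h1 : c = '*'
  · simp only [h1, if_true]
    by_cases hb : b = []
    · subst hb
      by_cases hf : f = []
      · subst hf; simp
      · have : (f.reverse ++ ([] : List Char)).length > 0 := by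
          simp [List.length_reverse, List.length_pos_iff, hf]
        simp only [ne_eq, not_true_eq_false, if_false, hf, if_pos, this,
          PySem.List.slice_to_neg_one]
        simp [List.dropLast_reverse, List.drop_one]
    · simp [hb, PySem.List.slice_to_neg_one, List.dropLast_append_of_ne_nil]
  · simp only [h1, if_false]
    by_cases h2 : c = '#'
    · simp [h2]
    · simp only [h2, if_false]
      by_cases h3 : c = '%'
      · simp [h3, PySem.List.slice?_none_none_neg_one]
      · simp [h3]

-- the invariant carried through the whole fold
theorem fold_inv (cs : List Char) (f b : List Char) :
    cs.foldl processStrA_step (f.reverse ++ b)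
      = (cs.foldl processStrB_step (f, b)).1.reverse ++ (cs.foldl processStrB_step (f, b)).2 := by
  induction cs generalizing f b with
  | nil => rfl
  | cons c cs ih =>
    simp only [List.foldl_cons, step_inv f b c]
    exact ih _ _

-- ===== VERDICT (by name: the statement is the Claim_ definition above) =====
theorem processStr_spec : Claim_equal_processStr := by
  intro s _
  unfold Spec_processStr processStr processStr_alt
  have := fold_inv s.toList [] []
  simp only [List.reverse_nil, List.nil_append] at this
  simp [this]
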